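-- pv_equiv track=rewrite | github.com/RafaelKuebler/AoC-2015 | day5/run.py | solve
-- ===== SOURCE A (Python) =====
-- from typing import Dict, List, Set
--
-- def solve(strings: List[str]) -> int:
--     valid_strings = 0
--
--     for string in strings:
--         vowels3 = 3 <= len([char for char in string if char in "aeiou"])
--
--         has_double = False
--         for i, char in enumerate(string):
--             if i == 0:
--                 continue
--             if char == string[i - 1]:
--                 has_double = True
--                 break
--
--         no_restricted = not any([invalid in string for invalid in ["ab", "cd", "pq", "xy"]])
--
--         if vowels3 and has_double and no_restricted:
--             valid_strings += 1
--
--     return valid_strings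
-- ===== SOURCE B (Python) =====
-- def _nice(s: str) -> bool:
--     vowels = 0
--     double = False
--     bad = False
--     prev = None
--     for c in s:
--         if c in "aeiou":
--             vowels += 1
--         if prev is not None:
--             if prev == c:
--                 double = True
--             if prev + c in ("ab", "cd", "pq", "xy"):
--                 bad = True
--         prev = c
--     return vowels >= 3 and double and not bad
--
--
-- def solve(strings):
--     return sum(1 for s in strings if _nice(s))
-- ===== Notes on version B (the rewrite author's own statement) =====
-- stated objective: alternative
-- what changed: B checks each string in one single left-to-right pass carrying (prev char, vowel count, double flag, bad-pair flag), replacing A's three separate scans per string (vowel filter comprehension, enumerate loop with indexing, substring search for each of the four restricted pairs).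
import Mathlib
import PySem

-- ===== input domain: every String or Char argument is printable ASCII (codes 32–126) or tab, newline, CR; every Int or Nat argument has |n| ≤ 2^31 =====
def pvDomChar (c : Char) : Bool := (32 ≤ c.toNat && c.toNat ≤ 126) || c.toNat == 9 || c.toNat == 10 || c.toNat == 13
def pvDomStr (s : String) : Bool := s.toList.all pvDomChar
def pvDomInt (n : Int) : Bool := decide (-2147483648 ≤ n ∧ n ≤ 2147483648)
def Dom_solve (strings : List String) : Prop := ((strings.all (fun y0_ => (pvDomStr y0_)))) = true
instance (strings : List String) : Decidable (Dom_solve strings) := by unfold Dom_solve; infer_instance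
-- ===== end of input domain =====

-- B replaces A's three separate scans per string by one single left-to-right pass
-- carrying (previous char, vowel count, double flag, bad-pair flag); return values agree.

-- ===== PORT A =====
-- A's inner `for i, char in enumerate(string)` loop with early break
def hasDoubleLoop (s : List Char) : List (Int × Char) → Bool
  | [] => false
  | (i, c) :: rest =>
    if i == 0 then hasDoubleLoop s rest
    else if PySem.List.pyGet? s (i - 1) == some c then true
    else hasDoubleLoop s rest

-- the body of A's outer loop
def solveStep (valid_strings : Int) (string : String) : Int :=
  let vowels3 := decide (3 ≤ (string.toList.filter (fun char => "aeiou".toList.contains char)).length)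
  let has_double := hasDoubleLoop string.toList (PySem.List.enumerate string.toList 0)
  let no_restricted := !(["ab", "cd", "pq", "xy"].any (fun invalid => PySem.Str.isIn invalid string))
  if vowels3 && has_double && no_restricted then valid_strings + 1 else valid_strings

def solve (strings : List String) : Int :=
  strings.foldl solveStep 0

-- ===== PORT B =====
-- one step of B's single pass: state = (prev, vowels, double, bad)
def niceStep (st : Option Char × Int × Bool × Bool) (c : Char) : Option Char × Int × Bool × Bool :=
  let v := if "aeiou".toList.contains c then st.2.1 + 1 else st.2.1
  match st.1 with
  | none => (some c, v, st.2.2.1, st.2.2.2)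
  | some p =>
    (some c, v, st.2.2.1 || (p == c),
     st.2.2.2 || ["ab", "cd", "pq", "xy"].contains (String.ofList [p, c]))

def nice (s : String) : Bool :=
  let st := s.toList.foldl niceStep (none, 0, false, false)
  decide (3 ≤ st.2.1) && st.2.2.1 && !st.2.2.2

def solve_alt (strings : List String) : Int := (strings.countP nice : Int)

-- ===== PRECONDITION & SPEC =====
def Spec_solve (strings : List String) (out : Int) : Prop := out = solve_alt strings
instance (strings : List String) (out : Int) : Decidable (Spec_solve strings out) := by unfold Spec_solve; infer_instance

-- ===== CLAIM (what is proved, stated in full; the proofs are below) =====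
def Claim_equal_solve : Prop := ∀ (strings : List String), Dom_solve strings → Spec_solve strings (solve strings)

-- ===== LEMMAS AND PROOFS =====

-- adjacent-pair scanner used to characterise both programs
def adj (P : Char → Char → Bool) : List Char → Bool
  | a :: b :: t => P a b || adj P (b :: t)
  | _ => false

def vowelB (c : Char) : Bool := "aeiou".toList.contains c
def badB (x y : Char) : Bool := ["ab", "cd", "pq", "xy"].contains (String.ofList [x, y])

lemma adj_short (P : Char → Char → Bool) (l : List Char) (h : l.length ≤ 1) : adj P l = false := by
  match l with
  | [] => rfl
  | [a] => rfl
  | a :: b :: t => simp at h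

lemma adj_or (P Q : Char → Char → Bool) (l : List Char) :
    adj (fun a b => P a b || Q a b) l = (adj P l || adj Q l) := by
  induction l with
  | nil => rfl
  | cons a t ih =>
    match t with
    | [] => rfl
    | b :: u =>
      simp only [adj, ih]
      cases P a b <;> cases Q a b <;> simp

-- B's single-pass invariant
lemma scan_spec (l : List Char) (p : Char) (v : Int) (d b : Bool) :
    l.foldl niceStep (some p, v, d, b) =
      (some (l.getLastD p),
       v + ((l.filter vowelB).length : Int),
       d || adj (· == ·) (p :: l),
       b || adj badB (p :: l)) := by
  induction l generalizing p v d b with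
  | nil => simp [adj]
  | cons a t ih =>
    simp only [List.foldl_cons, niceStep, ih, List.getLastD_cons]
    have hadj : ∀ P : Char → Char → Bool, adj P (p :: a :: t) = (P p a || adj P (a :: t)) := by
      intro P; rfl
    simp only [hadj, Prod.mk.injEq]
    refine ⟨trivial, ?_, Bool.or_assoc .., Bool.or_assoc ..⟩
    rw [List.filter_cons]
    by_cases hv : vowelB a = true
    · rw [if_pos (show ("aeiou".toList.contains a) = true from hv), if_pos hv]
      simp only [List.length_cons]
      push_cast; ring
    · rw [if_neg (show ¬ ("aeiou".toList.contains a) = true from hv), if_neg hv]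

lemma nice_eq (s : String) :
    nice s = (decide (3 ≤ (s.toList.filter vowelB).length) && adj (· == ·) s.toList && !(adj badB s.toList)) := by
  unfold nice
  cases h : s.toList with
  | nil => simp [adj]
  | cons c t =>
    rw [List.foldl_cons,
        show niceStep (none, 0, false, false) c = (some c, if vowelB c then (1 : Int) else 0, false, false) from by
          simp [niceStep, vowelB],
        scan_spec]
    simp only [Bool.false_or]
    have hcnt : (decide (3 ≤ (if vowelB c then (1 : Int) else 0) + ((t.filter vowelB).length : Int)))
        = decide (3 ≤ ((c :: t).filter vowelB).length) := by
      rw [decide_eq_decide, List.filter_cons]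
      by_cases hv : vowelB c = true <;> simp [hv] <;> omega
    rw [hcnt]

-- A's double-letter loop equals the adjacent-equal scanner
lemma hd_gen (l : List Char) : ∀ (rest : List Char) (k : Nat), 1 ≤ k → l.drop k = rest →
    hasDoubleLoop l (PySem.List.enumerate rest (k : Int)) = adj (· == ·) (l.drop (k - 1)) := by
  intro rest
  induction rest with
  | nil =>
    intro k hk hd
    have hlen : l.length ≤ k := by
      by_contra h
      have := List.drop_eq_nil_iff.mp hd
      omega
    rw [PySem.List.enumerate_nil]
    rw [adj_short]
    · rfl
    · simp; omega
  | cons r rs ih =>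
    intro k hk hd
    have hkl : k < l.length := by
      by_contra h
      rw [List.drop_eq_nil_of_le (by omega)] at hd
      simp at hd
    have hk1 : k - 1 < l.length := by omega
    have hdrop : l.drop (k - 1) = l[k - 1] :: r :: rs := by
      rw [← List.getElem_cons_drop hk1]
      congr 1
      rw [show k - 1 + 1 = k by omega, hd]
    rw [PySem.List.enumerate_cons]
    unfold hasDoubleLoop
    have hknz : ((k : Int) == 0) = false := by simp; omega
    rw [hknz]
    simp only [Bool.false_eq_true, if_false]
    have hget : PySem.List.pyGet? l ((k : Int) - 1) = some l[k - 1] := by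
      rw [show (k : Int) - 1 = ((k - 1 : Nat) : Int) by omega, PySem.List.pyGet?_natCast]
      exact List.getElem?_eq_getElem hk1
    rw [hget, hdrop]
    show _ = (l[k-1] == r || adj (· == ·) (r :: rs))
    by_cases he : l[k - 1] = r
    · simp [he]
    · have : (some l[k-1] == some r) = false := by simp [he]
      rw [this]
      simp only [Bool.false_eq_true, if_false]
      have hr : l.drop (k + 1) = rs := by
        have := List.getElem_cons_drop hkl
        rw [hd] at this
        exact (List.cons.injEq _ _ _ _).mp this.symm |>.2.symm
      have := ih (k + 1) (by omega) hr
      rw [show (((k + 1 : Nat)) : Int) = (k : Int) + 1 by push_cast; ring] at this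
      rw [this, show k + 1 - 1 = k from rfl, hd]
      simp [he]

lemma hd_eq (l : List Char) : hasDoubleLoop l (PySem.List.enumerate l 0) = adj (· == ·) l := by
  cases l with
  | nil => rfl
  | cons c t =>
    rw [PySem.List.enumerate_cons]
    unfold hasDoubleLoop
    simp only [show ((0 : Int) == 0) = true from rfl, if_true]
    have := hd_gen (c :: t) t 1 (le_refl 1) (by simp)
    simpa using this

-- a two-char pattern is a substring iff it occurs as an adjacent pair
lemma infix2 (x y : Char) (l : List Char) :
    ([x, y] <:+: l) ↔ adj (fun a b => x == a && y == b) l = true := by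
  induction l with
  | nil => simp [adj]
  | cons a t ih =>
    match t with
    | [] =>
      simp [adj, List.infix_cons_iff, List.cons_prefix_cons]
    | b :: u =>
      rw [List.infix_cons_iff, ih]
      show _ ↔ ((x == a && y == b) || adj _ (b :: u)) = true
      constructor
      · rintro (hp | hi)
        · rw [List.cons_prefix_cons] at hp
          obtain ⟨h1, hp⟩ := hp
          rw [List.cons_prefix_cons] at hp
          simp [h1, hp.1]
        · simp [hi]
      · intro h
        rcases Bool.or_eq_true_iff.mp h with h | h
        · left
          simp only [Bool.and_eq_true, beq_iff_eq] at h
          rw [List.cons_prefix_cons, List.cons_prefix_cons]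
          exact ⟨h.1, h.2, by simp⟩
        · right; exact h

lemma badB_expand (x y : Char) :
    badB x y = ((('a' == x) && ('b' == y)) || ((('c' == x) && ('d' == y)) ||
                ((('p' == x) && ('q' == y)) || (('x' == x) && ('y' == y))))) := by
  unfold badB
  have h : ∀ (c d : Char), (String.ofList [x, y] == String.ofList [c, d]) = ((c == x) && (d == y)) := by
    intro c d
    rw [Bool.eq_iff_iff]
    simp only [beq_iff_eq, Bool.and_eq_true, ← String.toList_inj]
    simp
    tauto
  simp only [List.contains_cons, List.contains_nil, Bool.or_false]
  rw [show ("ab" : String) = String.ofList ['a','b'] from rfl,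
      show ("cd" : String) = String.ofList ['c','d'] from rfl,
      show ("pq" : String) = String.ofList ['p','q'] from rfl,
      show ("xy" : String) = String.ofList ['x','y'] from rfl]
  simp only [h]

lemma restricted_eq (s : String) :
    (["ab", "cd", "pq", "xy"].any (fun invalid => PySem.Str.isIn invalid s)) = adj badB s.toList := by
  have hone : ∀ (c d : Char) (inv : String), inv.toList = [c, d] →
      PySem.Str.isIn inv s = adj (fun a b => c == a && d == b) s.toList := by
    intro c d inv hinv
    rw [Bool.eq_iff_iff, PySem.Str.isIn_iff_infix, hinv]
    exact infix2 c d s.toList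
  have hab := hone 'a' 'b' "ab" rfl
  have hcd := hone 'c' 'd' "cd" rfl
  have hpq := hone 'p' 'q' "pq" rfl
  have hxy := hone 'x' 'y' "xy" rfl
  simp only [List.any_cons, List.any_nil, Bool.or_false, hab, hcd, hpq, hxy]
  conv_rhs => rw [show (badB : Char → Char → Bool) = fun a b =>
    ((('a' == a) && ('b' == b)) || ((('c' == a) && ('d' == b)) ||
     ((('p' == a) && ('q' == b)) || (('x' == a) && ('y' == b))))) from funext fun a => funext fun b => badB_expand a b]
  rw [adj_or, adj_or, adj_or]

-- per-string agreement of the two programs' conditions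
lemma per_string (string : String) :
    (decide (3 ≤ (string.toList.filter (fun char => "aeiou".toList.contains char)).length)
      && hasDoubleLoop string.toList (PySem.List.enumerate string.toList 0)
      && !(["ab", "cd", "pq", "xy"].any (fun invalid => PySem.Str.isIn invalid string)))
    = nice string := by
  rw [nice_eq, hd_eq, restricted_eq]
  rfl

lemma solve_go (l : List String) (acc : Int) :
    l.foldl solveStep acc = acc + (l.countP nice : Int) := by
  induction l generalizing acc with
  | nil => simp
  | cons s t ih =>
    have hstep : solveStep acc s = if nice s then acc + 1 else acc := by
      simp only [solveStep]
      rw [per_string]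
    rw [List.foldl_cons, hstep, List.countP_cons, ih]
    by_cases h : nice s = true <;> simp [h] <;> omega

-- ===== VERDICT (by name: the statement is the Claim_ definition above) =====
theorem solve_spec : Claim_equal_solve := by
  intro strings _
  unfold Spec_solve solve solve_alt
  rw [solve_go]
  simp
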